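-- pv_equiv track=rewrite | github.com/tyncho08/COBOL-MIGRATED-MERGED-DOCUMENTATION | Migrated_App/backend/app/services/irs/bank_reconciliation.py | _generate_compliance_recommendations
-- ===== SOURCE A (Python) =====
-- from typing import List, Optional, Dict, Tuple
--
-- def _generate_compliance_recommendations(issues: List[str]) -> List[str]:
--     """Generate compliance improvement recommendations"""
--     recommendations = []
--
--     if any('completion rate' in issue for issue in issues):
--         recommendations.append("Complete all monthly bank reconciliations promptly")
--
--     if any('variance' in issue for issue in issues):
--         recommendations.append("Investigate and resolve reconciliation variances promptly")
--         recommendations.append("Review bank reconciliation procedures for accuracy")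
--
--     if any('Missing reconciliations' in issue for issue in issues):
--         recommendations.append("Establish monthly reconciliation schedule and controls")
--         recommendations.append("Set up automated reminders for reconciliation due dates")
--
--     if not recommendations:
--         recommendations.append("Maintain current reconciliation practices")
--
--     return recommendations
-- ===== SOURCE B (Python) =====
-- from typing import List
--
-- def _generate_compliance_recommendations(issues: List[str]) -> List[str]:
--     """Single pass over issues setting flags, then emit recommendations in fixed order."""
--     has_completion = has_variance = has_missing = False
--     for issue in issues:
--         if 'completion rate' in issue:
--             has_completion = True
--         if 'variance' in issue:
--             has_variance = True
--         if 'Missing reconciliations' in issue: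
--             has_missing = True
--     recommendations = []
--     if has_completion:
--         recommendations.append("Complete all monthly bank reconciliations promptly")
--     if has_variance:
--         recommendations.append("Investigate and resolve reconciliation variances promptly")
--         recommendations.append("Review bank reconciliation procedures for accuracy")
--     if has_missing:
--         recommendations.append("Establish monthly reconciliation schedule and controls")
--         recommendations.append("Set up automated reminders for reconciliation due dates")
--     if not recommendations:
--         recommendations.append("Maintain current reconciliation practices")
--     return recommendations
-- ===== Notes on version B (the rewrite author's own statement) =====
-- stated objective: simpler
-- what changed: Replaces three separate any() substring scans over issues with a single pass that records three boolean flags and then emits the recommendations from the flags in the original fixed order.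
import Mathlib
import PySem

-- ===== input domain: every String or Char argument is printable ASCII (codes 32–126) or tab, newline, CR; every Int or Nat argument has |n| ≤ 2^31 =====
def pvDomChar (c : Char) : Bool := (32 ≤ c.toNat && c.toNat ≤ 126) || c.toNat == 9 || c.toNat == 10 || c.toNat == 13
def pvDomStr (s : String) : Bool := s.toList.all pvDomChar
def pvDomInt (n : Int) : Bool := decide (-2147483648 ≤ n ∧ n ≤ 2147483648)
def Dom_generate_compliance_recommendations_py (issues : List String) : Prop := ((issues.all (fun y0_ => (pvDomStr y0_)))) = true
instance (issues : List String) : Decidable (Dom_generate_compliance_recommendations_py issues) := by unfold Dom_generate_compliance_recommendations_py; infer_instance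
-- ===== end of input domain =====

-- ===== PORT A =====
-- one honest line: B replaces A's three any() scans with a single pass over issues that sets three flags (simpler decomposition)
def generate_compliance_recommendations_py (issues : List String) : List String :=
  let recommendations : List String := []
  let recommendations :=
    if issues.any (fun issue => PySem.Str.isIn "completion rate" issue) then
      recommendations ++ ["Complete all monthly bank reconciliations promptly"]
    else recommendations
  let recommendations :=
    if issues.any (fun issue => PySem.Str.isIn "variance" issue) then
      recommendations ++ ["Investigate and resolve reconciliation variances promptly"]
        ++ ["Review bank reconciliation procedures for accuracy"]
    else recommendations
  let recommendations :=
    if issues.any (fun issue => PySem.Str.isIn "Missing reconciliations" issue) then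
      recommendations ++ ["Establish monthly reconciliation schedule and controls"]
        ++ ["Set up automated reminders for reconciliation due dates"]
    else recommendations
  let recommendations :=
    if recommendations.isEmpty then
      recommendations ++ ["Maintain current reconciliation practices"]
    else recommendations
  recommendations

-- ===== PORT B =====
def gcrFlags (issues : List String) : Bool × Bool × Bool :=
  issues.foldl
    (fun (st : Bool × Bool × Bool) issue =>
      let st := if PySem.Str.isIn "completion rate" issue then (true, st.2.1, st.2.2) else st
      let st := if PySem.Str.isIn "variance" issue then (st.1, true, st.2.2) else st
      if PySem.Str.isIn "Missing reconciliations" issue then (st.1, st.2.1, true) else st)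
    (false, false, false)

def generate_compliance_recommendations_py_alt (issues : List String) : List String :=
  let fl := gcrFlags issues
  let recommendations : List String := []
  let recommendations :=
    if fl.1 then recommendations ++ ["Complete all monthly bank reconciliations promptly"]
    else recommendations
  let recommendations :=
    if fl.2.1 then
      recommendations ++ ["Investigate and resolve reconciliation variances promptly"]
        ++ ["Review bank reconciliation procedures for accuracy"]
    else recommendations
  let recommendations :=
    if fl.2.2 then
      recommendations ++ ["Establish monthly reconciliation schedule and controls"]
        ++ ["Set up automated reminders for reconciliation due dates"]
    else recommendations
  let recommendations :=
    if recommendations.isEmpty then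
      recommendations ++ ["Maintain current reconciliation practices"]
    else recommendations
  recommendations

-- ===== PRECONDITION & SPEC =====
def Spec_generate_compliance_recommendations_py (issues : List String) (out : List String) : Prop := out = generate_compliance_recommendations_py_alt issues
instance (issues : List String) (out : List String) : Decidable (Spec_generate_compliance_recommendations_py issues out) := by unfold Spec_generate_compliance_recommendations_py; infer_instance

-- ===== CLAIM =====
def Claim_equal_generate_compliance_recommendations_py : Prop := ∀ (issues : List String), Dom_generate_compliance_recommendations_py issues → Spec_generate_compliance_recommendations_py issues (generate_compliance_recommendations_py issues)

-- ===== LEMMAS AND PROOFS =====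
theorem gcrStep_eq (a b c : Bool) (x : String) :
    (let st := if PySem.Str.isIn "completion rate" x then (true, (a,b,c).2.1, (a,b,c).2.2) else (a,b,c)
     let st := if PySem.Str.isIn "variance" x then (st.1, true, st.2.2) else st
     if PySem.Str.isIn "Missing reconciliations" x then (st.1, st.2.1, true) else st)
    = (a || PySem.Str.isIn "completion rate" x,
       b || PySem.Str.isIn "variance" x,
       c || PySem.Str.isIn "Missing reconciliations" x) := by
  cases h1 : PySem.Str.isIn "completion rate" x <;>
    cases h2 : PySem.Str.isIn "variance" x <;>
      cases h3 : PySem.Str.isIn "Missing reconciliations" x <;>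
        simp [h1, h3]

theorem gcrFlags_go (issues : List String) (a b c : Bool) :
    issues.foldl
      (fun (st : Bool × Bool × Bool) issue =>
        let st := if PySem.Str.isIn "completion rate" issue then (true, st.2.1, st.2.2) else st
        let st := if PySem.Str.isIn "variance" issue then (st.1, true, st.2.2) else st
        if PySem.Str.isIn "Missing reconciliations" issue then (st.1, st.2.1, true) else st)
      (a, b, c)
    = (a || issues.any (fun i => PySem.Str.isIn "completion rate" i),
       b || issues.any (fun i => PySem.Str.isIn "variance" i),
       c || issues.any (fun i => PySem.Str.isIn "Missing reconciliations" i)) := by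
  induction issues generalizing a b c with
  | nil => simp
  | cons x xs ih =>
    rw [List.foldl_cons]
    show List.foldl _ (let st := if PySem.Str.isIn "completion rate" x then (true, (a,b,c).2.1, (a,b,c).2.2) else (a,b,c)
      let st := if PySem.Str.isIn "variance" x then (st.1, true, st.2.2) else st
      if PySem.Str.isIn "Missing reconciliations" x then (st.1, st.2.1, true) else st) xs = _
    rw [gcrStep_eq]
    rw [ih]
    simp [Bool.or_assoc]

theorem gcrFlags_eq (issues : List String) :
    gcrFlags issues
    = (issues.any (fun i => PySem.Str.isIn "completion rate" i),
       issues.any (fun i => PySem.Str.isIn "variance" i),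
       issues.any (fun i => PySem.Str.isIn "Missing reconciliations" i)) := by
  have := gcrFlags_go issues false false false
  simpa [gcrFlags] using this

-- ===== VERDICT =====
theorem generate_compliance_recommendations_py_spec : Claim_equal_generate_compliance_recommendations_py := by
  intro issues _
  unfold Spec_generate_compliance_recommendations_py
  unfold generate_compliance_recommendations_py generate_compliance_recommendations_py_alt
  rw [gcrFlags_eq]
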